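-- pv_equiv track=rewrite | github.com/davwil00/aoc2018 | day5/part2.py | find_problematic_polymer
-- ===== SOURCE A (Python) =====
-- import string
--
-- def remove_pairs(input):
--     new_seq = []
--     it = iter(enumerate(input))
--     for i, char in it:
--         try:
--             char2 = input[i+1]
--         except IndexError:
--             char2 = ''
--         if char == char2:
--             new_seq.append(char)
--         elif str.lower(char) != str.lower(char2):
--             new_seq.append(char)
--         else:
--             next(it)
--     return new_seq
--
-- def find_problematic_polymer(input):
--     lengths = {}
--     for letter in string.ascii_lowercase:
--         new_input = input.replace(letter, '').replace(letter.upper(), '')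
--         old_len = len(input)
--         new_len = old_len - 1
--         new_seq = new_input
--         while old_len > new_len > 0:
--             old_len = new_len
--             new_seq = remove_pairs(new_seq)
--             new_len = len(new_seq)
--         lengths[letter] = new_len
--
--     problematic_polymer = min(lengths, key=lambda key: lengths.get(key))
--     return problematic_polymer, lengths.get(problematic_polymer)
-- ===== SOURCE B (Python) =====
-- import string
--
-- def find_problematic_polymer(input):
--     best = None
--     for letter in string.ascii_lowercase:
--         shortened = input.replace(letter, '').replace(letter.upper(), '')
--         stack = []
--         for ch in shortened:
--             if stack and ch != stack[-1] and ch.lower() == stack[-1].lower():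
--                 stack.pop()
--             else:
--                 stack.append(ch)
--         n = len(stack)
--         if best is None or n < best[1]:
--             best = (letter, n)
--     return best
-- ===== Notes on version B (the rewrite author's own statement) =====
-- stated objective: alternative
-- what changed: Per removed letter, B reacts the polymer in one stack pass instead of A's repeated remove_pairs sweeps until the length stabilises, and keeps a running best instead of building a dict and calling min.
-- intended difference: On inputs of length <= 1 (except "a" and "A", where the values coincide) A's loop counter is mis-seeded with len(input)-1 so it returns ('a', len(input)-1) regardless of content, e.g. ('a', -1) on the empty string; B returns the letter and length of the true shortest reacted polymer, which is the intended value. — e.g. on find_problematic_polymer(""): A returns ("a", -1), B returns ("a", 0)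
import Mathlib
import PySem

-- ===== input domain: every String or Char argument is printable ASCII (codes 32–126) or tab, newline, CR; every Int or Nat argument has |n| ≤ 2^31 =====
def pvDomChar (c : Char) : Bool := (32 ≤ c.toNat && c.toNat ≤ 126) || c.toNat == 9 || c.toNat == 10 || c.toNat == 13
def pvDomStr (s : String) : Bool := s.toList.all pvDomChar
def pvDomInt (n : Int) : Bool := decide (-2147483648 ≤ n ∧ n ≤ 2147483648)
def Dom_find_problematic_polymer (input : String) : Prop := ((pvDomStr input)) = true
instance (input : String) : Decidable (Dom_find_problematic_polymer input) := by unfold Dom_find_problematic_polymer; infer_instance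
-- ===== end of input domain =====

-- B reacts the polymer with a single stack pass per removed letter instead of A's repeated
-- remove_pairs sweeps until the length stabilises, and keeps a running best instead of a dict+min;
-- on inputs of length ≤ 1 A's mis-seeded loop counter makes it return ('a', len-1) unconditionally,
-- where B returns the intended value (see D_ below).

-- ===== PORT A =====
-- string.ascii_lowercase (module constant, shared by both Pythons)
def pvAsciiLowercase : List Char := "abcdefghijklmnopqrstuvwxyz".toList

-- remove_pairs: one left-to-right pass; the '' sentinel at the end is the singleton case
-- (char == '' is False and lower(char) != lower('') holds, so the last char is appended)
def pvRemovePairs : List Char → List Char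
  | [] => []
  | [c] => [c]
  | c1 :: c2 :: rest =>
    if c1 == c2 then c1 :: pvRemovePairs (c2 :: rest)
    else if PySem.Chars.lowerChar c1 != PySem.Chars.lowerChar c2 then c1 :: pvRemovePairs (c2 :: rest)
    else pvRemovePairs rest

-- the 'while old_len > new_len > 0' loop
def pvLoopA (oldLen newLen : Int) (seq : List Char) : Int :=
  if h : oldLen > newLen ∧ newLen > 0 then
    pvLoopA newLen (PySem.List.len (pvRemovePairs seq)) (pvRemovePairs seq)
  else newLen
termination_by oldLen.toNat
decreasing_by omega

def find_problematic_polymer (input : String) : String × Int :=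
  let lengths := pvAsciiLowercase.foldl (fun (d : PySem.Dict Char Int) letter =>
    let new_input := PySem.Str.replace (PySem.Str.replace input (String.ofList [letter]) "")
        (String.ofList [PySem.Chars.upperChar letter]) ""
    let old_len := PySem.Str.len input
    let new_len := old_len - 1
    d.insert letter (pvLoopA old_len new_len new_input.toList)) PySem.Dict.empty
  -- min(lengths, key=lengths.get): every key is present, so .get(k) is the stored value (getD _ _ 0 is exact)
  match PySem.List.min? (PySem.Dict.keys lengths) (fun k => PySem.Dict.getD lengths k 0) with
  | some p => (String.ofList [p], PySem.Dict.getD lengths p 0)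
  | none => ("", 0)   -- unreachable: the dict has 26 keys

-- ===== PORT B =====
-- the stack body: stack kept top-first (Python's stack[-1] is the head here)
def pvStackStep (st : List Char) (c : Char) : List Char :=
  match st with
  | [] => [c]
  | t :: rest =>
    if c != t && (PySem.Chars.lowerChar c == PySem.Chars.lowerChar t) then rest
    else c :: t :: rest

def find_problematic_polymer_alt (input : String) : String × Int :=
  let best := pvAsciiLowercase.foldl (fun (best : Option (String × Int)) letter =>
    let shortened := PySem.Str.replace (PySem.Str.replace input (String.ofList [letter]) "")
        (String.ofList [PySem.Chars.upperChar letter]) ""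
    let stack := shortened.toList.foldl pvStackStep []
    let n := PySem.List.len stack
    match best with
    | none => some (String.ofList [letter], n)
    | some b => if n < b.2 then some (String.ofList [letter], n) else some b) none
  match best with
  | some b => b
  | none => ("", 0)   -- unreachable: 26 letters

-- ===== PRECONDITION & SPEC =====
-- A seeds its reaction loop with new_len = len(input)-1, so on inputs of length ≤ 1 the loop never
-- runs and A returns ('a', len(input)-1) whatever the content; B returns the letter/length of the
-- true shortest reacted polymer (which happens to coincide with A's value exactly on "a" and "A"),
-- and B's value is the intended one.
def D_find_problematic_polymer (input : String) : Prop :=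
  input.toList.length ≤ 1 ∧ input ≠ "a" ∧ input ≠ "A"
instance (input : String) : Decidable (D_find_problematic_polymer input) := by
  unfold D_find_problematic_polymer; infer_instance

def Spec_find_problematic_polymer (input : String) (out : String × Int) : Prop :=
  ¬ D_find_problematic_polymer input → out = find_problematic_polymer_alt input
instance (input : String) (out : String × Int) : Decidable (Spec_find_problematic_polymer input out) := by
  unfold Spec_find_problematic_polymer; infer_instance

def pvDiffWitness_find_problematic_polymer : String := ""
def pvDiffWitnessOut_find_problematic_polymer : (String × Int) × (String × Int) := (("a", -1), ("a", 0))

-- ===== CLAIM (what is proved, stated in full; the proofs are below) =====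
def Claim_unchanged_find_problematic_polymer : Prop := ∀ (input : String), Dom_find_problematic_polymer input → Spec_find_problematic_polymer input (find_problematic_polymer input)
def Claim_changed_find_problematic_polymer : Prop := Dom_find_problematic_polymer (pvDiffWitness_find_problematic_polymer) ∧ D_find_problematic_polymer (pvDiffWitness_find_problematic_polymer) ∧ find_problematic_polymer (pvDiffWitness_find_problematic_polymer) = pvDiffWitnessOut_find_problematic_polymer.1 ∧ find_problematic_polymer_alt (pvDiffWitness_find_problematic_polymer) = pvDiffWitnessOut_find_problematic_polymer.2 ∧ pvDiffWitnessOut_find_problematic_polymer.1 ≠ pvDiffWitnessOut_find_problematic_polymer.2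

-- ===== LEMMAS AND PROOFS =====

-- the reaction test (B's pop condition); symmetric
def pvR (x y : Char) : Bool :=
  x != y && (PySem.Chars.lowerChar x == PySem.Chars.lowerChar y)

-- a list with no adjacent reacting pair ("reduced"); stacks always satisfy this
def pvGood (l : List Char) : Prop := List.IsChain (fun a b => pvR a b = false) l

lemma pvR_symm (x y : Char) : pvR x y = pvR y x := by
  unfold pvR; rw [bne_comm, Bool.beq_comm]

lemma pv_toNat_inj {a b : Char} (h : a.toNat = b.toNat) : a = b := by
  rw [← Char.ofNat_toNat a, ← Char.ofNat_toNat b, h]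

-- lowerChar identifies at most an ASCII upper/lower pair
lemma pv_lower_pair {a b : Char} (h : PySem.Chars.lowerChar a = PySem.Chars.lowerChar b)
    (hne : a ≠ b) :
    ((65 ≤ a.toNat ∧ a.toNat ≤ 90) ∧ a.toNat + 32 = b.toNat) ∨
    ((65 ≤ b.toNat ∧ b.toNat ≤ 90) ∧ b.toNat + 32 = a.toNat) := by
  have hup : ∀ c : Char, PySem.Chars.isupper c = true ↔ (65 ≤ c.toNat ∧ c.toNat ≤ 90) := by
    intro c
    have h1 : ('A' ≤ c) ↔ 65 ≤ c.toNat := by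
      rw [Char.le_def, UInt32.le_iff_toNat_le, show 'A'.val.toNat = 65 from by decide, Char.toNat_val]
    have h2 : (c ≤ 'Z') ↔ c.toNat ≤ 90 := by
      rw [Char.le_def, UInt32.le_iff_toNat_le, show 'Z'.val.toNat = 90 from by decide, Char.toNat_val]
    simp only [PySem.Chars.isupper, Bool.and_eq_true, decide_eq_true_eq, h1, h2]
  have hval : ∀ n : Nat, n ≤ 122 → (Char.ofNat n).toNat = n := by
    intro n hn
    rw [Char.toNat_ofNat, if_pos (Or.inl (by omega))]
  unfold PySem.Chars.lowerChar at h
  by_cases ha : PySem.Chars.isupper a = true <;> by_cases hb : PySem.Chars.isupper b = true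
  · rw [if_pos ha, if_pos hb] at h
    have ha' := (hup a).mp ha
    have hb' := (hup b).mp hb
    have h2 := congrArg Char.toNat h
    rw [hval _ (by omega), hval _ (by omega)] at h2
    exact absurd (pv_toNat_inj (by omega)) hne
  · rw [if_pos ha, if_neg hb] at h
    have ha' := (hup a).mp ha
    have h2 := congrArg Char.toNat h
    rw [hval _ (by omega)] at h2
    exact Or.inl ⟨ha', h2⟩
  · rw [if_neg ha, if_pos hb] at h
    have hb' := (hup b).mp hb
    have h2 := congrArg Char.toNat h.symm
    rw [hval _ (by omega)] at h2
    exact Or.inr ⟨hb', h2⟩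
  · rw [if_neg ha, if_neg hb] at h
    exact absurd h hne

-- the partner of x under pvR is unique
lemma pvR_unique {x t y : Char} (h1 : pvR x t = true) (h2 : pvR x y = true) : t = y := by
  simp only [pvR, Bool.and_eq_true, bne_iff_ne, ne_eq, beq_iff_eq] at h1 h2
  obtain ⟨hxt, hlt⟩ := h1
  obtain ⟨hxy, hly⟩ := h2
  have p1 := pv_lower_pair hlt (by exact fun h => hxt h)
  have p2 := pv_lower_pair hly (by exact fun h => hxy h)
  apply pv_toNat_inj
  rcases p1 with ⟨hx1, e1⟩ | ⟨ht1, e1⟩ <;> rcases p2 with ⟨hx2, e2⟩ | ⟨hy2, e2⟩ <;> omega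

lemma pvGood_tail {l : List Char} (h : pvGood l) : pvGood l.tail := by
  cases l with
  | nil => exact List.IsChain.nil
  | cons a t =>
    cases t with
    | nil => exact List.IsChain.nil
    | cons b r => exact List.IsChain.of_cons h

lemma pvGood_step {st : List Char} (hst : pvGood st) (c : Char) : pvGood (pvStackStep st c) := by
  cases st with
  | nil => exact List.IsChain.singleton c
  | cons t rest =>
    show pvGood (if (c != t && (PySem.Chars.lowerChar c == PySem.Chars.lowerChar t)) = true then rest else c :: t :: rest)
    by_cases hc : (c != t && (PySem.Chars.lowerChar c == PySem.Chars.lowerChar t)) = true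
    · rw [if_pos hc]
      exact pvGood_tail hst
    · rw [if_neg hc]
      exact List.isChain_cons_cons.mpr ⟨by simpa [pvR] using hc, hst⟩

-- pushing a reacting pair onto a reduced stack is a no-op
lemma pvStep_step {st : List Char} (hst : pvGood st) {x y : Char} (hxy : pvR x y = true) :
    pvStackStep (pvStackStep st x) y = st := by
  have hyx : (y != x && (PySem.Chars.lowerChar y == PySem.Chars.lowerChar x)) = true := by
    show pvR y x = true
    rw [← pvR_symm]; exact hxy
  cases st with
  | nil =>
    show (if (y != x && (PySem.Chars.lowerChar y == PySem.Chars.lowerChar x)) = true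
        then ([] : List Char) else y :: x :: []) = []
    rw [if_pos hyx]
  | cons t rest =>
    by_cases hxt : pvR x t = true
    · have hxt' : (x != t && (PySem.Chars.lowerChar x == PySem.Chars.lowerChar t)) = true := hxt
      have hty : t = y := pvR_unique hxt hxy
      show pvStackStep (if (x != t && (PySem.Chars.lowerChar x == PySem.Chars.lowerChar t)) = true
          then rest else x :: t :: rest) y = t :: rest
      rw [if_pos hxt']
      cases rest with
      | nil => subst hty; rfl
      | cons u r2 =>
        have hru : pvR t u = false := (List.isChain_cons_cons.mp hst).1
        have hyu : (y != u && (PySem.Chars.lowerChar y == PySem.Chars.lowerChar u)) = false := by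
          show pvR y u = false
          rw [← hty]; exact hru
        show (if (y != u && (PySem.Chars.lowerChar y == PySem.Chars.lowerChar u)) = true
            then r2 else y :: u :: r2) = t :: u :: r2
        rw [if_neg (by simp [hyu]), hty]
    · have hxt' : ¬ ((x != t && (PySem.Chars.lowerChar x == PySem.Chars.lowerChar t)) = true) := hxt
      show pvStackStep (if (x != t && (PySem.Chars.lowerChar x == PySem.Chars.lowerChar t)) = true
          then rest else x :: t :: rest) y = t :: rest
      rw [if_neg hxt']
      show (if (y != x && (PySem.Chars.lowerChar y == PySem.Chars.lowerChar x)) = true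
          then t :: rest else y :: x :: t :: rest) = t :: rest
      rw [if_pos hyx]

-- one remove_pairs pass does not change the stack reduction
lemma pv_foldl_removePairs (l : List Char) : ∀ st : List Char, pvGood st →
    (pvRemovePairs l).foldl pvStackStep st = l.foldl pvStackStep st := by
  induction l using pvRemovePairs.induct with
  | case1 => intro st _; rfl
  | case2 c => intro st _; rfl
  | case3 c1 c2 rest h ih =>
    intro st hst
    rw [pvRemovePairs, if_pos h]
    simp only [List.foldl_cons]
    exact ih (pvStackStep st c1) (pvGood_step hst c1)
  | case4 c1 c2 rest h1 h2 ih =>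
    intro st hst
    rw [pvRemovePairs, if_neg h1, if_pos h2]
    simp only [List.foldl_cons]
    exact ih (pvStackStep st c1) (pvGood_step hst c1)
  | case5 c1 c2 rest h1 h2 ih =>
    intro st hst
    rw [pvRemovePairs, if_neg h1, if_neg h2]
    have e1 : c1 ≠ c2 := by simpa using h1
    have e2 : PySem.Chars.lowerChar c1 = PySem.Chars.lowerChar c2 := by simpa [bne] using h2
    have hr : pvR c1 c2 = true := by simp [pvR, bne_iff_ne, e1, e2]
    simp only [List.foldl_cons]
    rw [ih st hst, pvStep_step hst hr]

lemma pvRemovePairs_length_le (l : List Char) : (pvRemovePairs l).length ≤ l.length := by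
  induction l using pvRemovePairs.induct with
  | case1 => simp [pvRemovePairs]
  | case2 c => simp [pvRemovePairs]
  | case3 c1 c2 rest h ih =>
    rw [pvRemovePairs, if_pos h]
    simp only [List.length_cons] at ih ⊢
    omega
  | case4 c1 c2 rest h1 h2 ih =>
    rw [pvRemovePairs, if_neg h1, if_pos h2]
    simp only [List.length_cons] at ih ⊢
    omega
  | case5 c1 c2 rest h1 h2 ih =>
    rw [pvRemovePairs, if_neg h1, if_neg h2]
    simp only [List.length_cons] at ih ⊢
    omega

lemma pvRemovePairs_parity (l : List Char) :
    ∃ k, l.length = (pvRemovePairs l).length + 2 * k := by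
  induction l using pvRemovePairs.induct with
  | case1 => exact ⟨0, by simp [pvRemovePairs]⟩
  | case2 c => exact ⟨0, by simp [pvRemovePairs]⟩
  | case3 c1 c2 rest h ih =>
    obtain ⟨k, hk⟩ := ih
    refine ⟨k, ?_⟩
    rw [pvRemovePairs, if_pos h]
    simp only [List.length_cons] at hk ⊢
    omega
  | case4 c1 c2 rest h1 h2 ih =>
    obtain ⟨k, hk⟩ := ih
    refine ⟨k, ?_⟩
    rw [pvRemovePairs, if_neg h1, if_pos h2]
    simp only [List.length_cons] at hk ⊢
    omega
  | case5 c1 c2 rest h1 h2 ih =>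
    obtain ⟨k, hk⟩ := ih
    refine ⟨k + 1, ?_⟩
    rw [pvRemovePairs, if_neg h1, if_neg h2]
    simp only [List.length_cons] at hk ⊢
    omega

lemma pvRemovePairs_eq_self {l : List Char} (h : (pvRemovePairs l).length = l.length) :
    pvRemovePairs l = l := by
  induction l using pvRemovePairs.induct with
  | case1 => rfl
  | case2 c => rfl
  | case3 c1 c2 rest hc ih =>
    rw [pvRemovePairs, if_pos hc] at h ⊢
    simp only [List.length_cons] at h
    rw [ih (by simp only [List.length_cons]; omega)]
  | case4 c1 c2 rest h1 h2 ih =>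
    rw [pvRemovePairs, if_neg h1, if_pos h2] at h ⊢
    simp only [List.length_cons] at h
    rw [ih (by simp only [List.length_cons]; omega)]
  | case5 c1 c2 rest h1 h2 ih =>
    rw [pvRemovePairs, if_neg h1, if_neg h2] at h
    have := pvRemovePairs_length_le rest
    simp only [List.length_cons] at h
    omega

lemma pvGood_of_fix {l : List Char} (h : pvRemovePairs l = l) : pvGood l := by
  induction l using pvRemovePairs.induct with
  | case1 => exact List.IsChain.nil
  | case2 c => exact List.IsChain.singleton c
  | case3 c1 c2 rest hc ih =>
    rw [pvRemovePairs, if_pos hc] at h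
    have ht := List.tail_eq_of_cons_eq h
    refine List.isChain_cons_cons.mpr ⟨?_, ih ht⟩
    have : c1 = c2 := by simpa using hc
    simp [pvR, this]
  | case4 c1 c2 rest h1 h2 ih =>
    rw [pvRemovePairs, if_neg h1, if_pos h2] at h
    have ht := List.tail_eq_of_cons_eq h
    refine List.isChain_cons_cons.mpr ⟨?_, ih ht⟩
    simp only [bne_iff_ne, ne_eq] at h2
    simp [pvR, h2]
  | case5 c1 c2 rest h1 h2 ih =>
    rw [pvRemovePairs, if_neg h1, if_neg h2] at h
    have h3 := congrArg List.length h
    have := pvRemovePairs_length_le rest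
    simp only [List.length_cons] at h3
    omega

-- a reduced list passes through the stack unchanged
lemma pv_foldl_of_good : ∀ (l st : List Char), pvGood st → pvGood l →
    (∀ h t, l.head? = some h → st.head? = some t → pvR h t = false) →
    l.foldl pvStackStep st = l.reverse ++ st := by
  intro l
  induction l with
  | nil => intro st _ _ _; simp
  | cons h rest ih =>
    intro st hst hl hcompat
    have hstep : pvStackStep st h = h :: st := by
      cases st with
      | nil => rfl
      | cons t r =>
        show (if (h != t && (PySem.Chars.lowerChar h == PySem.Chars.lowerChar t)) = true then r else h :: t :: r) = h :: t :: r
        rw [if_neg (by simp [show (h != t && (PySem.Chars.lowerChar h == PySem.Chars.lowerChar t)) = pvR h t from rfl, hcompat h t rfl rfl])]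
    simp only [List.foldl_cons, hstep]
    rw [ih (h :: st) ?_ (pvGood_tail hl) ?_]
    · simp
    · cases st with
      | nil => exact List.IsChain.singleton h
      | cons t r => exact List.isChain_cons_cons.mpr ⟨hcompat h t rfl rfl, hst⟩
    · intro h2 t2 hh2 ht2
      cases rest with
      | nil => simp at hh2
      | cons u r2 =>
        simp only [List.head?_cons, Option.some.injEq] at hh2 ht2
        subst hh2; subst ht2
        rw [pvR_symm]
        exact (List.isChain_cons_cons.mp hl).1

def pvStackLen (l : List Char) : Int := ((l.foldl pvStackStep []).length : Int)

lemma pvStackLen_of_good {l : List Char} (h : pvGood l) : pvStackLen l = (l.length : Int) := by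
  unfold pvStackLen
  rw [pv_foldl_of_good l [] List.IsChain.nil h (by intro _ _ _ ht; simp at ht)]
  simp

lemma pvStackLen_removePairs (l : List Char) : pvStackLen (pvRemovePairs l) = pvStackLen l := by
  unfold pvStackLen
  rw [pv_foldl_removePairs l [] List.IsChain.nil]

lemma pv_loop_lem (prev : List Char) :
    pvLoopA (prev.length : Int) ((pvRemovePairs prev).length : Int) (pvRemovePairs prev)
      = pvStackLen (pvRemovePairs prev) := by
  generalize hn : prev.length = n
  induction n using Nat.strong_induction_on generalizing prev with
  | _ n IH =>
  subst hn
  rw [pvLoopA]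
  by_cases hc : ((prev.length : Int) > ((pvRemovePairs prev).length : Int) ∧ ((pvRemovePairs prev).length : Int) > 0)
  · rw [dif_pos hc]
    simp only [PySem.List.len_eq]
    rw [IH (pvRemovePairs prev).length (by omega) (pvRemovePairs prev) rfl]
    exact pvStackLen_removePairs _
  · rw [dif_neg hc]
    by_cases h0 : (pvRemovePairs prev).length = 0
    · rw [h0]
      rw [List.length_eq_zero_iff.mp h0]
      simp [pvStackLen]
    · have hle := pvRemovePairs_length_le prev
      have heq : (pvRemovePairs prev).length = prev.length := by omega
      have hfix := pvRemovePairs_eq_self heq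
      rw [pvStackLen_of_good (by rw [hfix]; exact pvGood_of_fix hfix), heq]

-- entry into A's loop: for n ≥ 2 and any stripped list s of length ≤ n
lemma pv_entry (s : List Char) (n : Int) (hn : 2 ≤ n) (hs : (s.length : Int) ≤ n) :
    pvLoopA n (n - 1) s = pvStackLen s := by
  rw [pvLoopA, dif_pos (by omega)]
  simp only [PySem.List.len_eq]
  by_cases hc : (n - 1 > ((pvRemovePairs s).length : Int) ∧ ((pvRemovePairs s).length : Int) > 0)
  · rw [pvLoopA, dif_pos hc]
    simp only [PySem.List.len_eq]
    have h2 := pv_loop_lem (pvRemovePairs s)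
    calc pvLoopA ((pvRemovePairs s).length : Int)
          ((pvRemovePairs (pvRemovePairs s)).length : Int) (pvRemovePairs (pvRemovePairs s))
        = pvStackLen (pvRemovePairs (pvRemovePairs s)) := h2
      _ = pvStackLen (pvRemovePairs s) := pvStackLen_removePairs _
      _ = pvStackLen s := pvStackLen_removePairs _
  · rw [pvLoopA, dif_neg hc]
    by_cases h0 : (pvRemovePairs s).length = 0
    · rw [h0, ← pvStackLen_removePairs s, List.length_eq_zero_iff.mp h0]
      simp [pvStackLen]
    · obtain ⟨k, hk⟩ := pvRemovePairs_parity s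
      have hle := pvRemovePairs_length_le s
      have heq : (pvRemovePairs s).length = s.length := by omega
      have hfix := pvRemovePairs_eq_self heq
      rw [pvStackLen_of_good (pvGood_of_fix hfix), heq]

-- replace(c, \'\'): go removes every occurrence of c
lemma pv_replace_go (c : Char) : ∀ (l : List Char) (fuel : Nat) (acc : List Char),
    l.length ≤ fuel →
    PySem.Chars.replace.go [c] [] fuel l acc = acc.reverse ++ l.filter (· != c) := by
  intro l
  induction l with
  | nil =>
    intro fuel acc _
    cases fuel <;> simp [PySem.Chars.replace.go]
  | cons d t ih =>
    intro fuel acc hle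
    cases fuel with
    | zero => simp at hle
    | succ f =>
      rw [PySem.Chars.replace.go]
      have hpre : ([c].isPrefixOf (d :: t)) = (c == d) := by simp [List.isPrefixOf]
      simp only [List.length_cons] at hle
      by_cases hdc : (c == d) = true
      · rw [if_pos (by rw [hpre]; exact hdc)]
        have hcd : c = d := by simpa using hdc
        subst hcd
        simp only [List.reverse_nil, List.nil_append]
        rw [show List.drop [c].length (c :: t) = t from rfl]
        rw [ih f acc (by omega)]
        simp
      · rw [if_neg (by rw [hpre]; exact hdc)]
        rw [ih f (d :: acc) (by omega)]
        have hd : (d != c) = true := by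
          simp only [bne_iff_ne, ne_eq]
          intro hh
          exact hdc (by simp [hh])
        simp [hd]

lemma pv_replace_single (cs : List Char) (c : Char) :
    PySem.Chars.replace cs [c] [] = cs.filter (· != c) := by
  unfold PySem.Chars.replace
  rw [if_neg (by simp)]
  rw [pv_replace_go c cs cs.length [] le_rfl]
  simp

-- A's min(dict, key=get) is PySem.List.min?, whose fold step we name to reason about it
def pvMinStep (k : Char → Int) (acc : Option Char) (x : Char) : Option Char :=
  match acc with
  | none => some x
  | some m => if k x < k m then some x else some m

lemma pv_min?_eq_foldl (k : Char → Int) (ls : List Char) :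
    PySem.List.min? ls k = ls.foldl (pvMinStep k) none := by
  unfold PySem.List.min?
  congr 1
  funext acc x
  cases acc <;> rfl

-- the min? fold only looks at the key of list members and of the running champion
lemma pv_minFold_congr (k k' : Char → Int) : ∀ (ls : List Char) (acc : Option Char),
    (∀ c ∈ ls, k c = k' c) → (∀ m, acc = some m → k m = k' m) →
    ls.foldl (pvMinStep k) acc = ls.foldl (pvMinStep k') acc := by
  intro ls
  induction ls with
  | nil => intro acc _ _; rfl
  | cons c t ih =>
    intro acc hls hacc
    have hc := hls c (by simp)
    simp only [List.foldl_cons]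
    cases acc with
    | none =>
      rw [show pvMinStep k none c = some c from rfl, show pvMinStep k' none c = some c from rfl]
      exact ih (some c) (fun x hx => hls x (by simp [hx])) (fun m hm => by cases hm; exact hc)
    | some m =>
      have hm := hacc m rfl
      rw [show pvMinStep k (some m) c = (if k c < k m then some c else some m) from rfl,
        show pvMinStep k' (some m) c = (if k' c < k' m then some c else some m) from rfl,
        hc, hm]
      refine ih _ (fun x hx => hls x (by simp [hx])) ?_
      intro m2 hm2
      by_cases hlt : k' c < k' m
      · rw [if_pos hlt] at hm2; cases hm2; exact hc
      · rw [if_neg hlt] at hm2; cases hm2; exact hm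

-- selection: B's running-best fold is A's min?, paired with its key value
lemma pv_sel (k : Char → Int) : ∀ (ls : List Char) (acc : Option Char),
    ls.foldl (fun (best : Option (String × Int)) c =>
        match best with
        | none => some (String.ofList [c], k c)
        | some b => if k c < b.2 then some (String.ofList [c], k c) else some b)
      (acc.map (fun m => (String.ofList [m], k m)))
    = (ls.foldl (pvMinStep k) acc).map (fun m => (String.ofList [m], k m)) := by
  intro ls
  induction ls with
  | nil => intro acc; rfl
  | cons c t ih =>
    intro acc
    simp only [List.foldl_cons]
    cases acc with
    | none =>
      rw [show pvMinStep k none c = some c from rfl]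
      exact ih (some c)
    | some m =>
      rw [show pvMinStep k (some m) c = (if k c < k m then some c else some m) from rfl]
      dsimp only [Option.map_some]
      by_cases hlt : k c < k m
      · rw [if_pos hlt, if_pos hlt]
        exact ih (some c)
      · rw [if_neg hlt, if_neg hlt]
        exact ih (some m)

-- the whole per-letter loop glued to the selection: A's dict+min against B's running best
lemma pv_glue (v w : Char → Int) (hvw : ∀ c, v c = w c) :
    (match PySem.List.min?
        (PySem.Dict.keys (pvAsciiLowercase.foldl
          (fun (d : PySem.Dict Char Int) letter => d.insert letter (v letter)) PySem.Dict.empty))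
        (fun k => PySem.Dict.getD (pvAsciiLowercase.foldl
          (fun (d : PySem.Dict Char Int) letter => d.insert letter (v letter)) PySem.Dict.empty) k 0) with
     | some p => (String.ofList [p],
        PySem.Dict.getD (pvAsciiLowercase.foldl
          (fun (d : PySem.Dict Char Int) letter => d.insert letter (v letter)) PySem.Dict.empty) p 0)
     | none => ("", 0))
    = (match pvAsciiLowercase.foldl (fun (best : Option (String × Int)) letter =>
          match best with
          | none => some (String.ofList [letter], w letter)
          | some b => if w letter < b.2 then some (String.ofList [letter], w letter) else some b) none with
       | some b => b
       | none => ("", 0)) := by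
  set D := pvAsciiLowercase.foldl
      (fun (d : PySem.Dict Char Int) letter => d.insert letter (v letter)) PySem.Dict.empty with hDdef
  clear_value D
  have hitems : D.items = pvAsciiLowercase.map (fun c => (c, v c)) := by
    rw [hDdef]
    have h0 := PySem.Dict.items_foldl_insert_fresh pvAsciiLowercase (fun a => a) v
      PySem.Dict.empty (fun a _ => PySem.Dict.contains_empty _) (by decide)
    simpa using h0
  have hkeys : PySem.Dict.keys D = pvAsciiLowercase := by
    simp only [PySem.Dict.keys, hitems, List.map_map]
    simp [Function.comp_def]
  have hnd : (PySem.Dict.keys D).Nodup := by rw [hkeys]; decide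
  have hget : ∀ c ∈ pvAsciiLowercase, PySem.Dict.getD D c 0 = v c := by
    intro c hc
    exact PySem.Dict.getD_of_mem_items D (by rw [hitems]; exact List.mem_map_of_mem hc) hnd 0
  have hcong : PySem.List.min? pvAsciiLowercase (fun k => PySem.Dict.getD D k 0)
      = PySem.List.min? pvAsciiLowercase w := by
    rw [pv_min?_eq_foldl (fun k => PySem.Dict.getD D k 0), pv_min?_eq_foldl w]
    exact pv_minFold_congr (fun k => PySem.Dict.getD D k 0) w pvAsciiLowercase none
      (fun c hc => by show PySem.Dict.getD D c 0 = w c; rw [hget c hc, hvw c])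
      (fun m hm => by cases hm)
  have hB := pv_sel w pvAsciiLowercase none
  simp only [Option.map_none] at hB
  rw [hkeys, hB, ← pv_min?_eq_foldl w]
  cases hmin : PySem.List.min? pvAsciiLowercase w with
  | none =>
    exact absurd ((PySem.List.min?_eq_none_iff _ _).mp hmin) (by decide)
  | some p =>
    have hpL : p ∈ pvAsciiLowercase := PySem.List.min?_mem hmin
    rw [hcong, hmin]
    show (String.ofList [p], PySem.Dict.getD D p 0) = (String.ofList [p], w p)
    rw [hget p hpL, hvw p]

set_option maxHeartbeats 2000000 in
lemma pv_main (input : String) (h2 : 2 ≤ input.toList.length) :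
    find_problematic_polymer input = find_problematic_polymer_alt input := by
  have hlen : PySem.Str.len input = (input.toList.length : Int) := PySem.Str.len_eq input
  have hvw : ∀ c : Char,
      pvLoopA (PySem.Str.len input) (PySem.Str.len input - 1)
        (PySem.Str.replace (PySem.Str.replace input (String.ofList [c]) "")
          (String.ofList [PySem.Chars.upperChar c]) "").toList
      = PySem.List.len ((PySem.Str.replace (PySem.Str.replace input (String.ofList [c]) "")
          (String.ofList [PySem.Chars.upperChar c]) "").toList.foldl pvStackStep []) := by
    intro c
    have hshort : (PySem.Str.replace (PySem.Str.replace input (String.ofList [c]) "")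
        (String.ofList [PySem.Chars.upperChar c]) "").toList
        = (input.toList.filter (· != c)).filter (· != PySem.Chars.upperChar c) := by
      simp only [PySem.Str.toList_replace, String.toList_ofList]
      rw [show ("" : String).toList = [] from rfl]
      rw [pv_replace_single, pv_replace_single]
    have hle : ((((PySem.Str.replace (PySem.Str.replace input (String.ofList [c]) "")
        (String.ofList [PySem.Chars.upperChar c]) "").toList).length : Int)) ≤ PySem.Str.len input := by
      rw [hshort, hlen]
      have a1 := List.length_filter_le (· != PySem.Chars.upperChar c) (input.toList.filter (· != c))
      have a2 := List.length_filter_le (· != c) input.toList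
      exact_mod_cast le_trans a1 a2
    have h2' : (2 : Int) ≤ PySem.Str.len input := by rw [hlen]; exact_mod_cast h2
    rw [pv_entry _ _ h2' hle]
    simp [pvStackLen, PySem.List.len_eq]
  unfold find_problematic_polymer find_problematic_polymer_alt
  dsimp only
  rw [pv_glue
    (fun letter => pvLoopA (PySem.Str.len input) (PySem.Str.len input - 1)
      (PySem.Str.replace (PySem.Str.replace input (String.ofList [letter]) "")
        (String.ofList [PySem.Chars.upperChar letter]) "").toList)
    (fun letter => PySem.List.len (List.foldl pvStackStep []
      (PySem.Str.replace (PySem.Str.replace input (String.ofList [letter]) "")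
        (String.ofList [PySem.Chars.upperChar letter]) "").toList))
    hvw]

-- ===== VERDICT (by name: the statement is the Claim_ definition above) =====
set_option maxHeartbeats 2000000 in
theorem find_problematic_polymer_spec : Claim_unchanged_find_problematic_polymer := by
  intro input _hdom
  unfold Spec_find_problematic_polymer
  intro hD
  by_cases hlen : input.toList.length ≤ 1
  · have hcase : input = "a" ∨ input = "A" := by
      by_cases ha : input = "a"
      · exact Or.inl ha
      by_cases hA : input = "A"
      · exact Or.inr hA
      exact absurd (show D_find_problematic_polymer input from ⟨hlen, ha, hA⟩) hD
    have h1 : ∀ s : List Char, pvLoopA 1 (1 - 1) s = 0 := by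
      intro s
      rw [pvLoopA, dif_neg (by omega)]
      norm_num
    rcases hcase with rfl | rfl
    · have hl : PySem.Str.len "a" = 1 := by decide
      unfold find_problematic_polymer
      simp only [hl, h1]
      decide
    · have hl : PySem.Str.len "A" = 1 := by decide
      unfold find_problematic_polymer
      simp only [hl, h1]
      decide
  · exact pv_main input (by omega)

set_option maxHeartbeats 2000000 in
theorem find_problematic_polymer_changed : Claim_changed_find_problematic_polymer := by
  unfold Claim_changed_find_problematic_polymer
  refine ⟨by decide, by decide, ?_, by decide, by decide⟩
  have h0 : PySem.Str.len "" = 0 := by decide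
  have hL : ∀ s : List Char, pvLoopA 0 (0 - 1) s = 0 - 1 := by
    intro s
    rw [pvLoopA, dif_neg (by omega)]
  show find_problematic_polymer "" = ("a", -1)
  unfold find_problematic_polymer
  simp only [h0, hL]
  decide
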